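-- pv_equiv track=rewrite | github.com/eki-project/finn-plus | scripts/builderConfToWiki.py | extract_field_comment
-- ===== SOURCE A (Python) =====
-- from typing import Any, Dict, List, Optional
--
-- def extract_field_comment(source_lines: List[str], lineno: int) -> Optional[str]:
--     """Extract field documentation comments that appear before the field definition."""
--     # Look for comment lines before the current line that start with #:
--     comment_lines: List[str] = []
--     current_line: int = lineno - 2  # Start one line before the field definition
--
--     while current_line >= 0:
--         line: str = source_lines[current_line].strip()
--         if line.startswith("#:"):
--             # Extract the comment text
--             comment_text: str = line[2:].strip()
--             comment_lines.insert(0, comment_text)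
--             current_line -= 1
--         elif line == "":
--             # Skip empty lines
--             current_line -= 1
--         else:
--             # Stop when we hit non-comment, non-empty line
--             break
--
--     # Join multiple comment lines with space
--     return " ".join(comment_lines) if comment_lines else None
-- ===== SOURCE B (Python) =====
-- def extract_field_comment(source_lines, lineno):
--     """Extract field documentation comments that appear before the field definition."""
--     # Forward single pass over the lines before the field definition, keeping a
--     # running block of #: comments that is reset by any other non-empty line.
--     block = []
--     for raw in source_lines[:max(0, lineno - 1)]:
--         line = raw.strip()
--         if line.startswith("#:"):
--             block.append(line[2:].strip())
--         elif line != "":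
--             block = []
--     return " ".join(block) if block else None
-- ===== Notes on version B (the rewrite author's own statement) =====
-- stated objective: simpler
-- what changed: Replaced A's backward while-loop with index arithmetic and insert(0,..) by a single forward for-loop over the clamped prefix slice that accumulates #: comments and resets on any other non-empty line.
import Mathlib
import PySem

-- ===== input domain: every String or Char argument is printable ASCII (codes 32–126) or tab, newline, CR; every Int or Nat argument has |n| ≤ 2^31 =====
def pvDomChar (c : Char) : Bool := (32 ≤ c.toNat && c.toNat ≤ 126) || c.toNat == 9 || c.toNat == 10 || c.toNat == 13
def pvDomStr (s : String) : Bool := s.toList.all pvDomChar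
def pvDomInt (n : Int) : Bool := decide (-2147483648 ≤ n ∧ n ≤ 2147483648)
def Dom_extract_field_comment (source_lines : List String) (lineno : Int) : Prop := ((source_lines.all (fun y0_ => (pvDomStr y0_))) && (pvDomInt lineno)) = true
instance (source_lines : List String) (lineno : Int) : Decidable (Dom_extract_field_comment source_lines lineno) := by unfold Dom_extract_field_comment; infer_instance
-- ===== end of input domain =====

-- B replaces A's backward while-loop (insert at front, stop at the first non-comment
-- non-empty line) by a forward fold over the clamped prefix that resets on such lines: simpler decomposition.

-- ===== PORT A =====
-- the while-loop of A: index going down, prepending comment texts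
def aLoop (source_lines : List String) (i : Int) (acc : List String) : List String :=
  if h : 0 ≤ i then
    match PySem.List.pyGet? source_lines i with
    | none => acc   -- Python raises IndexError here; excluded by Pre_
    | some raw =>
      let line := PySem.Str.strip raw
      if PySem.Str.startswith line "#:" then
        aLoop source_lines (i - 1) (PySem.Str.strip (PySem.Str.slice line (some 2) none) :: acc)
      else if line = "" then
        aLoop source_lines (i - 1) acc
      else acc
  else acc
termination_by (i + 1).toNat
decreasing_by all_goals omega

def extract_field_comment (source_lines : List String) (lineno : Int) : Option String :=
  let comment_lines := aLoop source_lines (lineno - 2) []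
  if comment_lines = [] then none else some (PySem.Str.join " " comment_lines)

-- ===== PORT B =====
-- one forward step of B's loop
def bStep (block : List String) (raw : String) : List String :=
  let line := PySem.Str.strip raw
  if PySem.Str.startswith line "#:" then
    block ++ [PySem.Str.strip (PySem.Str.slice line (some 2) none)]
  else if line = "" then block
  else []

def extract_field_comment_alt (source_lines : List String) (lineno : Int) : Option String :=
  let block := (PySem.List.slice source_lines none (some (max 0 (lineno - 1)))).foldl bStep []
  if block = [] then none else some (PySem.Str.join " " block)

-- ===== PRECONDITION & SPEC =====
-- Pre_ excludes exactly the inputs where A raises IndexError (start index past the end of the list)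
def Pre_extract_field_comment (source_lines : List String) (lineno : Int) : Prop :=
  lineno < (source_lines.length : Int) + 2
instance (source_lines : List String) (lineno : Int) : Decidable (Pre_extract_field_comment source_lines lineno) := by unfold Pre_extract_field_comment; infer_instance
def pvWitness_extract_field_comment : List String × Int := (["#: doc", "x: int"], 2)

def Spec_extract_field_comment (source_lines : List String) (lineno : Int) (out : Option String) : Prop := out = extract_field_comment_alt source_lines lineno
instance (source_lines : List String) (lineno : Int) (out : Option String) : Decidable (Spec_extract_field_comment source_lines lineno out) := by unfold Spec_extract_field_comment; infer_instance

-- ===== CLAIM (what is proved, stated in full; the proofs are below) =====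
def Claim_equal_extract_field_comment : Prop := ∀ (source_lines : List String) (lineno : Int), Dom_extract_field_comment source_lines lineno → Pre_extract_field_comment source_lines lineno → Spec_extract_field_comment source_lines lineno (extract_field_comment source_lines lineno)


-- ===== LEMMAS AND PROOFS =====

-- A's backward loop, rewritten as structural recursion over the REVERSED prefix list
def bw (xs : List String) (acc : List String) : List String :=
  match xs with
  | [] => acc
  | raw :: rest =>
    let line := PySem.Str.strip raw
    if PySem.Str.startswith line "#:" then
      bw rest (PySem.Str.strip (PySem.Str.slice line (some 2) none) :: acc)
    else if line = "" then bw rest acc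
    else acc

theorem aLoop_neg (source_lines : List String) (i : Int) (acc : List String) (h : i < 0) :
    aLoop source_lines i acc = acc := by
  rw [aLoop]; simp [Int.not_le.mpr h]

theorem aLoop_eq_bw (source_lines : List String) (k : Nat) (hk : k ≤ source_lines.length)
    (acc : List String) :
    aLoop source_lines ((k : Int) - 1) acc = bw ((source_lines.take k).reverse) acc := by
  induction k generalizing acc with
  | zero => simp [aLoop_neg, bw]
  | succ n ih =>
    have hn : n < source_lines.length := by omega
    have hget : PySem.List.pyGet? source_lines ((n : Int)) = some source_lines[n] :=
      PySem.List.pyGet?_ofNat _ _ hn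
    have hidx : ((n + 1 : Nat) : Int) - 1 = (n : Int) := by push_cast; ring
    have htake : (source_lines.take (n + 1)).reverse
        = source_lines[n] :: (source_lines.take n).reverse := by
      rw [List.take_add_one]
      simp [List.getElem?_eq_getElem hn]
    rw [hidx, aLoop, htake]
    simp only [hget, Nat.cast_nonneg, dif_pos, bw]
    split
    · exact ih (by omega) _
    · split
      · exact ih (by omega) _
      · rfl

theorem bw_reverse_eq_foldl (xs : List String) (acc : List String) :
    bw xs.reverse acc = xs.foldl bStep [] ++ acc := by
  induction xs using List.reverseRecOn generalizing acc with
  | nil => simp [bw]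
  | append_singleton ys x ih =>
    rw [List.reverse_append, List.foldl_append]
    simp only [List.reverse_singleton, List.singleton_append, List.foldl_cons, List.foldl_nil, bw, bStep]
    split
    · rw [ih]; simp
    · split
      · exact ih acc
      · simp

-- ===== VERDICT (by name: the statement is the Claim_ definition above) =====
theorem extract_field_comment_spec : Claim_equal_extract_field_comment := by
  intro source_lines lineno _ hpre
  unfold Spec_extract_field_comment extract_field_comment extract_field_comment_alt
  unfold Pre_extract_field_comment at hpre
  by_cases hle : lineno ≤ 1
  · have h0 : max (0 : Int) (lineno - 1) = 0 := by omega
    rw [aLoop_neg _ _ _ (by omega), h0, PySem.List.slice_to _ le_rfl]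
    simp
  · have hk : (lineno - 1).toNat ≤ source_lines.length := by omega
    have hcast : ((lineno - 1).toNat : Int) - 1 = lineno - 2 := by omega
    have hmax : max (0 : Int) (lineno - 1) = lineno - 1 := by omega
    rw [hmax, PySem.List.slice_to _ (by omega), ← hcast,
        aLoop_eq_bw _ _ hk, bw_reverse_eq_foldl]
    simp
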